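-- pv_equiv track=rewrite | github.com/vupercut-official/mismoiWebsite | tools/generate-dms.py | bio_fallback
-- ===== SOURCE A (Python) =====
-- def bio_fallback(bio, full_name):
--     """Generate a personalized detail from bio keywords when Gemini fails."""
--     bio_lower = (bio or "").lower()
--     name_lower = (full_name or "").lower()
--     combined = bio_lower + " " + name_lower
--
--     # Check for specific content signals
--     if any(w in combined for w in ["vegan", "plant-based", "plant based"]):
--         return "the plant-based journey"
--     if any(w in combined for w in ["bbq", "barbecue", "barbeque", "smoker"]):
--         return "the BBQ game"
--     if any(w in combined for w in ["bake", "baker", "bakery", "pastry", "pastries"]):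
--         return "the baking content"
--     if any(w in combined for w in ["pizza"]):
--         return "the pizza content"
--     if any(w in combined for w in ["taco", "mexican", "latino", "latina"]):
--         return "the Mexican food content"
--     if any(w in combined for w in ["sushi", "japanese", "ramen"]):
--         return "the Japanese food content"
--     if any(w in combined for w in ["korean", "kimchi"]):
--         return "the Korean food content"
--     if any(w in combined for w in ["thai"]):
--         return "the Thai food content"
--     if any(w in combined for w in ["indian", "curry", "masala"]):
--         return "the Indian food content"
--     if any(w in combined for w in ["seafood", "crab", "oyster", "fish"]):
--         return "the seafood content"
--     if any(w in combined for w in ["cocktail", "wine", "bar", "mixolog"]):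
--         return "the drinks content"
--     if any(w in combined for w in ["brunch"]):
--         return "the brunch spots"
--     if any(w in combined for w in ["food truck"]):
--         return "the food truck hustle"
--     if any(w in combined for w in ["chef", "culinary"]):
--         return "the culinary work"
--     if any(w in combined for w in ["review", "critic"]):
--         return "the honest reviews"
--     if any(w in combined for w in ["photographer", "photo", "📸"]):
--         return "the food photography"
--     if any(w in combined for w in ["dmv", "nova", "northern virginia", "virginia"]):
--         return "the DMV food finds"
--     if any(w in combined for w in ["dc", "washington", "district"]):
--         return "the DC food scene coverage"
--     if any(w in combined for w in ["maryland", "md "]):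
--         return "the Maryland food finds"
--     if any(w in combined for w in ["foodie", "food blog", "food content"]):
--         return "the foodie content"
--     if any(w in combined for w in ["eat", "eats", "eating", "taste", "tasting"]):
--         return "the food finds"
--     if any(w in combined for w in ["restaurant", "dining"]):
--         return "the restaurant spotlights"
--     return "what you're doing"
-- ===== SOURCE B (Python) =====
-- KEYWORD_RULES = {
--     'vegan': (0, 'the plant-based journey'),
--     'plant-based': (0, 'the plant-based journey'),
--     'plant based': (0, 'the plant-based journey'),
--     'bbq': (1, 'the BBQ game'),
--     'barbecue': (1, 'the BBQ game'),
--     'barbeque': (1, 'the BBQ game'),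
--     'smoker': (1, 'the BBQ game'),
--     'bake': (2, 'the baking content'),
--     'baker': (2, 'the baking content'),
--     'bakery': (2, 'the baking content'),
--     'pastry': (2, 'the baking content'),
--     'pastries': (2, 'the baking content'),
--     'pizza': (3, 'the pizza content'),
--     'taco': (4, 'the Mexican food content'),
--     'mexican': (4, 'the Mexican food content'),
--     'latino': (4, 'the Mexican food content'),
--     'latina': (4, 'the Mexican food content'),
--     'sushi': (5, 'the Japanese food content'),
--     'japanese': (5, 'the Japanese food content'),
--     'ramen': (5, 'the Japanese food content'),
--     'korean': (6, 'the Korean food content'),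
--     'kimchi': (6, 'the Korean food content'),
--     'thai': (7, 'the Thai food content'),
--     'indian': (8, 'the Indian food content'),
--     'curry': (8, 'the Indian food content'),
--     'masala': (8, 'the Indian food content'),
--     'seafood': (9, 'the seafood content'),
--     'crab': (9, 'the seafood content'),
--     'oyster': (9, 'the seafood content'),
--     'fish': (9, 'the seafood content'),
--     'cocktail': (10, 'the drinks content'),
--     'wine': (10, 'the drinks content'),
--     'bar': (10, 'the drinks content'),
--     'mixolog': (10, 'the drinks content'),
--     'brunch': (11, 'the brunch spots'),
--     'food truck': (12, 'the food truck hustle'),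
--     'chef': (13, 'the culinary work'),
--     'culinary': (13, 'the culinary work'),
--     'review': (14, 'the honest reviews'),
--     'critic': (14, 'the honest reviews'),
--     'photographer': (15, 'the food photography'),
--     'photo': (15, 'the food photography'),
--     '📸': (15, 'the food photography'),
--     'dmv': (16, 'the DMV food finds'),
--     'nova': (16, 'the DMV food finds'),
--     'northern virginia': (16, 'the DMV food finds'),
--     'virginia': (16, 'the DMV food finds'),
--     'dc': (17, 'the DC food scene coverage'),
--     'washington': (17, 'the DC food scene coverage'),
--     'district': (17, 'the DC food scene coverage'),
--     'maryland': (18, 'the Maryland food finds'),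
--     'md ': (18, 'the Maryland food finds'),
--     'foodie': (19, 'the foodie content'),
--     'food blog': (19, 'the foodie content'),
--     'food content': (19, 'the foodie content'),
--     'eat': (20, 'the food finds'),
--     'eats': (20, 'the food finds'),
--     'eating': (20, 'the food finds'),
--     'taste': (20, 'the food finds'),
--     'tasting': (20, 'the food finds'),
--     'restaurant': (21, 'the restaurant spotlights'),
--     'dining': (21, 'the restaurant spotlights'),
-- }
--
--
-- def bio_fallback(bio, full_name):
--     """Generate a personalized detail from bio keywords when Gemini fails."""
--     combined = (bio or "").lower() + " " + (full_name or "").lower()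
--     best = None
--     phrase = "what you're doing"
--     for kw, (prio, ph) in KEYWORD_RULES.items():
--         if kw in combined and (best is None or prio < best):
--             best, phrase = prio, ph
--     return phrase
-- ===== Notes on version B (the rewrite author's own statement) =====
-- stated objective: alternative
-- what changed: Replaces A's ordered 22-branch early-return cascade over keyword groups with one flat keyword->(priority, phrase) map scanned in a single accumulator pass that keeps the minimum-priority hit (scan order irrelevant), returning that phrase or the default.
import Mathlib
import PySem

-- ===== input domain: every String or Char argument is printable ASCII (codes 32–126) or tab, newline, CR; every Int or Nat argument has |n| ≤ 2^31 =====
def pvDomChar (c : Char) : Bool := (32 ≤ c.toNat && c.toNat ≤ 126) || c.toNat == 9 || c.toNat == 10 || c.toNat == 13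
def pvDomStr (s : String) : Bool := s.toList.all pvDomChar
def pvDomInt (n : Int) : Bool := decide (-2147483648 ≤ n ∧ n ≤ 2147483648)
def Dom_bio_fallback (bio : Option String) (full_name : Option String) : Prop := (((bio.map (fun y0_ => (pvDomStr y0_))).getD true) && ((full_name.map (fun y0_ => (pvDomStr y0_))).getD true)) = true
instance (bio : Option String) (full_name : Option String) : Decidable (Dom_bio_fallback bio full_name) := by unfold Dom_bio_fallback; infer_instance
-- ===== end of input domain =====

-- B replaces A's ordered 22-branch early-return cascade with one flat keyword -> (priority, phrase)
-- map scanned in a single accumulator pass keeping the minimum-priority hit (alternative; same cost).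

-- ===== PORT A =====
-- string concatenation and 'in' are ported on List Char (PySem.Chars) for kernel transparency
def pvAnyIn (ws : List String) (combined : List Char) : Bool :=
  ws.any (fun w => PySem.Chars.isIn w.toList combined)

def bio_fallback (bio : Option String) (full_name : Option String) : String :=
  let bio_lower := PySem.Chars.lower (bio.getD "").toList
  let name_lower := PySem.Chars.lower (full_name.getD "").toList
  let combined := bio_lower ++ [' '] ++ name_lower
  if pvAnyIn ["vegan", "plant-based", "plant based"] combined then "the plant-based journey"
  else if pvAnyIn ["bbq", "barbecue", "barbeque", "smoker"] combined then "the BBQ game"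
  else if pvAnyIn ["bake", "baker", "bakery", "pastry", "pastries"] combined then "the baking content"
  else if pvAnyIn ["pizza"] combined then "the pizza content"
  else if pvAnyIn ["taco", "mexican", "latino", "latina"] combined then "the Mexican food content"
  else if pvAnyIn ["sushi", "japanese", "ramen"] combined then "the Japanese food content"
  else if pvAnyIn ["korean", "kimchi"] combined then "the Korean food content"
  else if pvAnyIn ["thai"] combined then "the Thai food content"
  else if pvAnyIn ["indian", "curry", "masala"] combined then "the Indian food content"
  else if pvAnyIn ["seafood", "crab", "oyster", "fish"] combined then "the seafood content"
  else if pvAnyIn ["cocktail", "wine", "bar", "mixolog"] combined then "the drinks content"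
  else if pvAnyIn ["brunch"] combined then "the brunch spots"
  else if pvAnyIn ["food truck"] combined then "the food truck hustle"
  else if pvAnyIn ["chef", "culinary"] combined then "the culinary work"
  else if pvAnyIn ["review", "critic"] combined then "the honest reviews"
  else if pvAnyIn ["photographer", "photo", "📸"] combined then "the food photography"
  else if pvAnyIn ["dmv", "nova", "northern virginia", "virginia"] combined then "the DMV food finds"
  else if pvAnyIn ["dc", "washington", "district"] combined then "the DC food scene coverage"
  else if pvAnyIn ["maryland", "md "] combined then "the Maryland food finds"
  else if pvAnyIn ["foodie", "food blog", "food content"] combined then "the foodie content"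
  else if pvAnyIn ["eat", "eats", "eating", "taste", "tasting"] combined then "the food finds"
  else if pvAnyIn ["restaurant", "dining"] combined then "the restaurant spotlights"
  else "what you\'re doing"

-- ===== PORT B =====
-- KEYWORD_RULES as an insertion-ordered association list (dict -> List (K x V))
def pvKeyTable : List (String × Nat × String) :=
  [ ("vegan", 0, "the plant-based journey"),
    ("plant-based", 0, "the plant-based journey"),
    ("plant based", 0, "the plant-based journey"),
    ("bbq", 1, "the BBQ game"),
    ("barbecue", 1, "the BBQ game"),
    ("barbeque", 1, "the BBQ game"),
    ("smoker", 1, "the BBQ game"),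
    ("bake", 2, "the baking content"),
    ("baker", 2, "the baking content"),
    ("bakery", 2, "the baking content"),
    ("pastry", 2, "the baking content"),
    ("pastries", 2, "the baking content"),
    ("pizza", 3, "the pizza content"),
    ("taco", 4, "the Mexican food content"),
    ("mexican", 4, "the Mexican food content"),
    ("latino", 4, "the Mexican food content"),
    ("latina", 4, "the Mexican food content"),
    ("sushi", 5, "the Japanese food content"),
    ("japanese", 5, "the Japanese food content"),
    ("ramen", 5, "the Japanese food content"),
    ("korean", 6, "the Korean food content"),
    ("kimchi", 6, "the Korean food content"),
    ("thai", 7, "the Thai food content"),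
    ("indian", 8, "the Indian food content"),
    ("curry", 8, "the Indian food content"),
    ("masala", 8, "the Indian food content"),
    ("seafood", 9, "the seafood content"),
    ("crab", 9, "the seafood content"),
    ("oyster", 9, "the seafood content"),
    ("fish", 9, "the seafood content"),
    ("cocktail", 10, "the drinks content"),
    ("wine", 10, "the drinks content"),
    ("bar", 10, "the drinks content"),
    ("mixolog", 10, "the drinks content"),
    ("brunch", 11, "the brunch spots"),
    ("food truck", 12, "the food truck hustle"),
    ("chef", 13, "the culinary work"),
    ("culinary", 13, "the culinary work"),
    ("review", 14, "the honest reviews"),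
    ("critic", 14, "the honest reviews"),
    ("photographer", 15, "the food photography"),
    ("photo", 15, "the food photography"),
    ("📸", 15, "the food photography"),
    ("dmv", 16, "the DMV food finds"),
    ("nova", 16, "the DMV food finds"),
    ("northern virginia", 16, "the DMV food finds"),
    ("virginia", 16, "the DMV food finds"),
    ("dc", 17, "the DC food scene coverage"),
    ("washington", 17, "the DC food scene coverage"),
    ("district", 17, "the DC food scene coverage"),
    ("maryland", 18, "the Maryland food finds"),
    ("md ", 18, "the Maryland food finds"),
    ("foodie", 19, "the foodie content"),
    ("food blog", 19, "the foodie content"),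
    ("food content", 19, "the foodie content"),
    ("eat", 20, "the food finds"),
    ("eats", 20, "the food finds"),
    ("eating", 20, "the food finds"),
    ("taste", 20, "the food finds"),
    ("tasting", 20, "the food finds"),
    ("restaurant", 21, "the restaurant spotlights"),
    ("dining", 21, "the restaurant spotlights") ]
-- the 'for kw, (prio, ph) in KEYWORD_RULES.items()' loop body: keep the minimum-priority hit
def pvStep (combined : List Char) (st : Option (Nat × String)) (e : String × Nat × String) :
    Option (Nat × String) :=
  if PySem.Chars.isIn e.1.toList combined &&
      (match st with | none => true | some (m, _) => decide (e.2.1 < m)) then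
    some e.2
  else st

def bio_fallback_alt (bio : Option String) (full_name : Option String) : String :=
  let combined := PySem.Chars.lower (bio.getD "").toList ++ [' '] ++
    PySem.Chars.lower (full_name.getD "").toList
  match pvKeyTable.foldl (pvStep combined) none with
  | some (_, ph) => ph
  | none => "what you\'re doing"

-- ===== PRECONDITION & SPEC =====
def Spec_bio_fallback (bio : Option String) (full_name : Option String) (out : String) : Prop := out = bio_fallback_alt bio full_name
instance (bio : Option String) (full_name : Option String) (out : String) : Decidable (Spec_bio_fallback bio full_name out) := by unfold Spec_bio_fallback; infer_instance

-- ===== CLAIM (what is proved, stated in full; the proofs are below) =====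
def Claim_equal_bio_fallback : Prop := ∀ (bio : Option String) (full_name : Option String), Dom_bio_fallback bio full_name → Spec_bio_fallback bio full_name (bio_fallback bio full_name)

-- ===== LEMMAS AND PROOFS =====
-- proof helpers: A's grouped rule table, its flattening with priorities, and first-match scan
def pvGroups : List (List String × String) :=
  [ (["vegan", "plant-based", "plant based"], "the plant-based journey"),
    (["bbq", "barbecue", "barbeque", "smoker"], "the BBQ game"),
    (["bake", "baker", "bakery", "pastry", "pastries"], "the baking content"),
    (["pizza"], "the pizza content"),
    (["taco", "mexican", "latino", "latina"], "the Mexican food content"),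
    (["sushi", "japanese", "ramen"], "the Japanese food content"),
    (["korean", "kimchi"], "the Korean food content"),
    (["thai"], "the Thai food content"),
    (["indian", "curry", "masala"], "the Indian food content"),
    (["seafood", "crab", "oyster", "fish"], "the seafood content"),
    (["cocktail", "wine", "bar", "mixolog"], "the drinks content"),
    (["brunch"], "the brunch spots"),
    (["food truck"], "the food truck hustle"),
    (["chef", "culinary"], "the culinary work"),
    (["review", "critic"], "the honest reviews"),
    (["photographer", "photo", "📸"], "the food photography"),
    (["dmv", "nova", "northern virginia", "virginia"], "the DMV food finds"),
    (["dc", "washington", "district"], "the DC food scene coverage"),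
    (["maryland", "md "], "the Maryland food finds"),
    (["foodie", "food blog", "food content"], "the foodie content"),
    (["eat", "eats", "eating", "taste", "tasting"], "the food finds"),
    (["restaurant", "dining"], "the restaurant spotlights") ]

def pvFlatten : Nat → List (List String × String) → List (String × Nat × String)
  | _, [] => []
  | n, (ks, ph) :: rest => ks.map (fun k => (k, n, ph)) ++ pvFlatten (n + 1) rest

def pvScanOpt (c : List Char) : List (List String × String) → Option String
  | [] => none
  | (ks, ph) :: rest => if pvAnyIn ks c then some ph else pvScanOpt c rest

theorem pvFold_group_fixed (c : List Char) (ks : List String) (n : Nat) (ph : String)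
    (m : Nat) (q : String) (h : m ≤ n) :
    (ks.map (fun k => (k, n, ph))).foldl (pvStep c) (some (m, q)) = some (m, q) := by
  induction ks with
  | nil => rfl
  | cons k t ih =>
    simp only [List.map, List.foldl, pvStep]
    have : decide (n < m) = false := by simp; omega
    simp [this, ih]

theorem pvFold_flatten_fixed (c : List Char) (rules : List (List String × String))
    (n m : Nat) (q : String) (h : m ≤ n) :
    (pvFlatten n rules).foldl (pvStep c) (some (m, q)) = some (m, q) := by
  induction rules generalizing n with
  | nil => rfl
  | cons g rest ih =>
    obtain ⟨ks, ph⟩ := g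
    simp only [pvFlatten, List.foldl_append]
    rw [pvFold_group_fixed c ks n ph m q h, ih (n + 1) (by omega)]

theorem pvFold_group_none (c : List Char) (ks : List String) (n : Nat) (ph : String) :
    (ks.map (fun k => (k, n, ph))).foldl (pvStep c) none =
      if ks.any (fun w => PySem.Chars.isIn w.toList c) then some (n, ph) else none := by
  induction ks with
  | nil => rfl
  | cons k t ih =>
    simp only [List.map, List.foldl, List.any_cons]
    by_cases hk : PySem.Chars.isIn k.toList c
    · simp only [pvStep, hk, Bool.true_and]
      simp [pvFold_group_fixed c t n ph n ph (le_refl n)]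
    · simp only [pvStep, hk]
      simp [ih]

theorem pvFold_flatten_scan (c : List Char) (rules : List (List String × String)) (n : Nat) :
    ((pvFlatten n rules).foldl (pvStep c) none).map Prod.snd = pvScanOpt c rules := by
  induction rules generalizing n with
  | nil => rfl
  | cons g rest ih =>
    obtain ⟨ks, ph⟩ := g
    simp only [pvFlatten, List.foldl_append, pvFold_group_none, pvScanOpt, pvAnyIn]
    by_cases h : ks.any (fun w => PySem.Chars.isIn w.toList c)
    · simp [h, pvFold_flatten_fixed c rest (n + 1) n ph (by omega)]
    · simp [h, ih]

theorem pvKeyTable_eq_flatten : pvKeyTable = pvFlatten 0 pvGroups := by rfl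

theorem pvScan_cons (c : List Char) (ks : List String) (ph : String)
    (rest : List (List String × String)) (d : String) :
    (pvScanOpt c ((ks, ph) :: rest)).getD d =
      if pvAnyIn ks c then ph else (pvScanOpt c rest).getD d := by
  simp only [pvScanOpt]; split <;> rfl

theorem pvMatch_getD (o : Option (Nat × String)) (d : String) :
    (match o with | some (_, ph) => ph | none => d) = (o.map Prod.snd).getD d := by
  cases o with
  | none => rfl
  | some p => rfl

-- ===== VERDICT (by name: the statement is the Claim_ definition above) =====
theorem bio_fallback_spec : Claim_equal_bio_fallback := by
  intro bio full_name _
  unfold Spec_bio_fallback bio_fallback bio_fallback_alt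
  rw [pvKeyTable_eq_flatten, pvMatch_getD, pvFold_flatten_scan]
  simp only [pvGroups, pvScan_cons]
  rfl
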